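-- pv_equiv track=rewrite | github.com/Torfab/adventOfCodeAndOtherEvents | adventOfCode/2019/day16.py | doAPhase
-- ===== SOURCE A (Python) =====
-- def doAPhase(elements, mainPattern):
--   elementCursor=0
--   newElements=[]
--   while(elementCursor<len(elements)):
--     repetition=elementCursor+1
--     innerCursor=0
--     blip=0
--     counter=1
--     if counter%repetition==0:
--       blip=(blip+1)%len(mainPattern)
--     ris=0
--     while(innerCursor<len(elements)):
--       ris=ris+elements[innerCursor]*mainPattern[blip]
--       innerCursor=innerCursor+1
--       counter=counter+1
--       if counter%repetition==0:
--         blip=(blip+1)%len(mainPattern)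
--     newElements.append(abs(ris)%10)
--     elementCursor=elementCursor+1
--   return newElements
-- ===== SOURCE B (Python) =====
-- def doAPhase(elements, mainPattern):
--     n = len(elements)
--     if n == 0:
--         return []
--     m = len(mainPattern)
--     P = [0]
--     for e in elements:
--         P.append(P[-1] + e)
--     out = []
--     for r in range(n):
--         rep = r + 1
--         ris = 0
--         for j in range(n // rep + 1):
--             lo = max(0, j * rep - 1)
--             hi = min(n, (j + 1) * rep - 1)
--             ris += mainPattern[j % m] * (P[hi] - P[lo])
--         out.append(abs(ris) % 10)
--     return out
-- ===== Notes on version B (the rewrite author's own statement) =====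
-- stated objective: faster
-- what changed: B precomputes one prefix-sum array and, per output row, sums over the constant-weight pattern blocks (block value = difference of two prefix sums), replacing A's stateful counter/blip rescan of every element for every row; O(n^2) becomes O(n log n) by the harmonic series.
import Mathlib
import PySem

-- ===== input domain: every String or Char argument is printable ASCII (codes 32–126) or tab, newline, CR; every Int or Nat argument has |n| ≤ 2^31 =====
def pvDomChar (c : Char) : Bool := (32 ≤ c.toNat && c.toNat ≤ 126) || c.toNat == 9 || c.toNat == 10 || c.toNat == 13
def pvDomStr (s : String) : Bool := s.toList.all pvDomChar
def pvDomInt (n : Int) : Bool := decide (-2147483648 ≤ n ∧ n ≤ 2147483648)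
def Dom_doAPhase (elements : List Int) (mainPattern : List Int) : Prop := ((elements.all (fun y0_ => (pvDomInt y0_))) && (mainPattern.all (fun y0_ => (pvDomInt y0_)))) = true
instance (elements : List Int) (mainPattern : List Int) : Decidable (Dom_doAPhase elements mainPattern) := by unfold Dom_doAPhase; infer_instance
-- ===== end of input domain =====

-- B replaces A's per-row rescan of all elements by prefix sums over the constant-weight
-- pattern blocks (harmonic total): measurably faster, same values on Pre_.

-- ===== PORT A =====
-- inner while: state (counter, blip, ris); innerCursor walks the list structurally
def doAPhaseInner (pat : List Int) (rep : Nat) : List Int → Nat → Nat → Int → Int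
  | [], _, _, ris => ris
  | e :: rest, counter, blip, ris =>
      let ris' := ris + e * pat.getD blip 0   -- pat[blip]; blip < len(pat) on admitted inputs
      let counter' := counter + 1
      let blip' := if counter' % rep = 0 then (blip + 1) % pat.length else blip
      doAPhaseInner pat rep rest counter' blip' ris'

-- outer while over elementCursor; abs(ris) % 10 is |ris| % 10 (exact: divisor 10 > 0)
def doAPhaseOuter (elements pat : List Int) (elementCursor : Nat) : List Int :=
  if _h : elementCursor < elements.length then
    let rep := elementCursor + 1
    let blip0 := if 1 % rep = 0 then (0 + 1) % pat.length else 0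
    let ris := doAPhaseInner pat rep elements 1 blip0 0
    (|ris| % 10) :: doAPhaseOuter elements pat (elementCursor + 1)
  else []
termination_by elements.length - elementCursor

def doAPhase (elements : List Int) (mainPattern : List Int) : List Int :=
  doAPhaseOuter elements mainPattern 0

-- ===== PORT B =====
def doAPhase_alt (elements : List Int) (mainPattern : List Int) : List Int :=
  let n := elements.length
  if n = 0 then []
  else
    let m := mainPattern.length
    -- P = [0]; for e in elements: P.append(P[-1] + e)
    let P := elements.foldl (fun P e => P ++ [(PySem.List.pyGet? P (-1)).getD 0 + e]) [0]
    (List.range n).foldl (fun out r =>       -- for r in range(n)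
      let rep := r + 1
      let ris := (List.range (n / rep + 1)).foldl (fun ris j =>
        let lo := j * rep - 1                -- Nat sub = Python's max(0, j*rep-1)
        let hi := min n ((j + 1) * rep - 1)
        ris + mainPattern.getD (j % m) 0 * (P.getD hi 0 - P.getD lo 0)) 0
      out ++ [|ris| % 10]) []

-- ===== PRECONDITION & SPEC =====
-- Pre_ excludes mainPattern = [] with nonempty elements: there Python A raises
-- ZeroDivisionError (and Python B raises IndexError too).
def Pre_doAPhase (elements : List Int) (mainPattern : List Int) : Prop :=
  elements = [] ∨ mainPattern ≠ []
instance (elements : List Int) (mainPattern : List Int) : Decidable (Pre_doAPhase elements mainPattern) := by unfold Pre_doAPhase; infer_instance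
def pvWitness_doAPhase : List Int × List Int := ([1, 2, 3, 4], [0, 1, 0, -1])

def Spec_doAPhase (elements : List Int) (mainPattern : List Int) (out : List Int) : Prop := out = doAPhase_alt elements mainPattern
instance (elements : List Int) (mainPattern : List Int) (out : List Int) : Decidable (Spec_doAPhase elements mainPattern out) := by unfold Spec_doAPhase; infer_instance

-- ===== CLAIM (what is proved, stated in full; the proofs are below) =====
def Claim_equal_doAPhase : Prop := ∀ (elements : List Int) (mainPattern : List Int), Dom_doAPhase elements mainPattern → Pre_doAPhase elements mainPattern → Spec_doAPhase elements mainPattern (doAPhase elements mainPattern)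

-- ===== LEMMAS AND PROOFS =====

-- the common value of row r (rep = r+1): the weight of element i is pat[((i+1)/rep) % m]
def rowSum (elements pat : List Int) (rep : Nat) : Int :=
  ∑ i ∈ Finset.range elements.length,
    elements.getD i 0 * pat.getD ((i + 1) / rep % pat.length) 0

theorem mod_succ_mod (a m : Nat) : (a % m + 1) % m = (a + 1) % m := by
  conv_rhs => rw [Nat.add_mod]
  rw [Nat.add_mod (a % m) 1 m, Nat.mod_mod_of_dvd _ (dvd_refl m)]

theorem succ_div_mod (k rep m : Nat) :
    (if (k + 1) % rep = 0 then (k / rep % m + 1) % m else k / rep % m)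
      = (k + 1) / rep % m := by
  rw [Nat.succ_div]
  by_cases h : rep ∣ (k + 1)
  · rw [if_pos (Nat.dvd_iff_mod_eq_zero.mp h), if_pos h, mod_succ_mod]
  · rw [if_neg (fun hc => h (Nat.dvd_iff_mod_eq_zero.mpr hc)), if_neg h, Nat.add_zero]

-- invariant of A's inner while: blip = counter / rep % m throughout
theorem innerA_eq (pat : List Int) (rep : Nat) :
    ∀ (xs : List Int) (k : Nat) (ris : Int),
      doAPhaseInner pat rep xs k (k / rep % pat.length) ris
        = ris + ∑ i ∈ Finset.range xs.length,
            xs.getD i 0 * pat.getD ((k + i) / rep % pat.length) 0 := by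
  intro xs
  induction xs with
  | nil => intro k ris; simp [doAPhaseInner]
  | cons e rest ih =>
      intro k ris
      rw [doAPhaseInner]
      simp only [succ_div_mod k rep pat.length]
      rw [ih (k + 1)]
      conv_rhs => rw [List.length_cons, Finset.sum_range_succ']
      simp only [List.getD_cons_succ, List.getD_cons_zero, Nat.add_zero]
      have hs : ∀ i, rest.getD i 0 * pat.getD ((k + 1 + i) / rep % pat.length) 0
          = rest.getD i 0 * pat.getD ((k + (i + 1)) / rep % pat.length) 0 := by
        intro i; rw [show k + 1 + i = k + (i + 1) from by omega]
      rw [Finset.sum_congr rfl (fun i _ => hs i)]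
      ring

-- the running sums B's prefix loop appends
def psums : Int → List Int → List Int
  | _, [] => []
  | s, e :: es => (s + e) :: psums (s + e) es

theorem foldl_prefix : ∀ (xs L : List Int) (hL : L ≠ []),
    xs.foldl (fun P e => P ++ [(PySem.List.pyGet? P (-1)).getD 0 + e]) L
      = L ++ psums (L.getLast hL) xs := by
  intro xs
  induction xs with
  | nil => intro L hL; simp [psums]
  | cons e es ih =>
      intro L hL
      rw [List.foldl_cons, ih _ (by simp)]
      rw [PySem.List.pyGet?_neg_one, List.getLast?_eq_some_getLast hL]
      simp only [Option.getD_some]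
      rw [List.getLast_concat]
      simp [psums]

theorem psums_getD : ∀ (xs : List Int) (s : Int) (i : Nat), i < xs.length →
    (psums s xs).getD i 0 = s + ∑ t ∈ Finset.range (i + 1), xs.getD t 0 := by
  intro xs
  induction xs with
  | nil => intro s i h; simp at h
  | cons e es ih =>
      intro s i h
      cases i with
      | zero => simp [psums]
      | succ i =>
          rw [psums, List.getD_cons_succ, ih _ i (by simpa using h)]
          conv_rhs => rw [Finset.sum_range_succ']
          simp only [List.getD_cons_succ, List.getD_cons_zero]
          ring

theorem P_getD (elements : List Int) (k : Nat) (hk : k ≤ elements.length) :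
    ((elements.foldl (fun P e => P ++ [(PySem.List.pyGet? P (-1)).getD 0 + e]) [0]).getD k 0)
      = ∑ t ∈ Finset.range k, elements.getD t 0 := by
  rw [foldl_prefix elements [0] (by simp)]
  cases k with
  | zero => simp
  | succ i =>
      have h0 : List.getLast [(0 : Int)] (by simp) = 0 := rfl
      rw [h0]
      simp only [List.cons_append, List.nil_append, List.getD_cons_succ]
      rw [psums_getD elements 0 i (by omega)]
      ring

-- each block j of B contributes exactly the terms of rowSum with (i+1)/rep = j
theorem blockFold (elements pat P : List Int) (rep : Nat) (hrep : 0 < rep)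
    (hP : ∀ k, k ≤ elements.length → P.getD k 0 = ∑ t ∈ Finset.range k, elements.getD t 0) :
    ∀ J, J ≤ elements.length / rep + 1 →
      (List.range J).foldl (fun ris j =>
          ris + pat.getD (j % pat.length) 0 *
            (P.getD (min elements.length ((j + 1) * rep - 1)) 0 - P.getD (j * rep - 1) 0)) 0
        = ∑ i ∈ Finset.range (min elements.length (J * rep - 1)),
            elements.getD i 0 * pat.getD ((i + 1) / rep % pat.length) 0 := by
  intro J
  induction J with
  | zero =>
      intro _
      simp
  | succ J ih =>
      intro hJ
      have hJn : J * rep ≤ elements.length := (Nat.le_div_iff_mul_le hrep).mp (by omega)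
      have hmul : (J + 1) * rep = J * rep + rep := by ring
      rw [List.range_succ, List.foldl_append, ih (by omega)]
      simp only [List.foldl_cons, List.foldl_nil]
      have hlo : min elements.length (J * rep - 1) = J * rep - 1 := by omega
      rw [hlo, hP (J * rep - 1) (by omega),
        hP (min elements.length ((J + 1) * rep - 1)) (by omega),
        ← Finset.sum_Ico_eq_sub _ (by omega), Finset.mul_sum]
      have hcong : ∀ i ∈ Finset.Ico (J * rep - 1) (min elements.length ((J + 1) * rep - 1)),
          pat.getD (J % pat.length) 0 * elements.getD i 0
            = elements.getD i 0 * pat.getD ((i + 1) / rep % pat.length) 0 := by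
        intro i hi
        simp only [Finset.mem_Ico] at hi
        have hdiv : (i + 1) / rep = J := Nat.div_eq_of_lt_le (by omega) (by omega)
        rw [hdiv]; ring
      rw [Finset.sum_congr rfl hcong, Finset.sum_Ico_eq_sub _ (by omega)]
      ring

theorem alt_eq (elements pat : List Int) :
    doAPhase_alt elements pat
      = (List.range elements.length).map (fun r => |rowSum elements pat (r + 1)| % 10) := by
  by_cases hn : elements.length = 0
  · simp [doAPhase_alt, hn]
  · rw [doAPhase_alt]
    simp only [if_neg hn]
    rw [PySem.List.foldl_append_singleton_eq_map, List.nil_append]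
    apply List.map_congr_left
    intro r _
    have hrep : 0 < r + 1 := by omega
    rw [blockFold elements pat _ (r + 1) hrep
      (fun k hk => P_getD elements k hk) (elements.length / (r + 1) + 1) (le_refl _)]
    have hmul : (elements.length / (r + 1) + 1) * (r + 1)
        = elements.length / (r + 1) * (r + 1) + (r + 1) := by ring
    have h1 := Nat.div_add_mod elements.length (r + 1)
    have h2 := Nat.mod_lt elements.length hrep
    have h3 : elements.length / (r + 1) * (r + 1) = (r + 1) * (elements.length / (r + 1)) :=
      Nat.mul_comm _ _
    rw [hmul]
    have hmin : min elements.length (elements.length / (r + 1) * (r + 1) + (r + 1) - 1)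
        = elements.length := by omega
    rw [hmin, rowSum]

theorem outerA_eq (elements pat : List Int) :
    ∀ (fuel c : Nat), elements.length - c = fuel →
      doAPhaseOuter elements pat c
        = (List.range' c (elements.length - c)).map
            (fun r => |rowSum elements pat (r + 1)| % 10) := by
  intro fuel
  induction fuel with
  | zero =>
      intro c hc
      rw [doAPhaseOuter, dif_neg (by omega)]
      simp [hc]
  | succ fuel ih =>
      intro c hc
      have hcn : c < elements.length := by omega
      rw [doAPhaseOuter, dif_pos hcn]
      have hblip : (if 1 % (c + 1) = 0 then (0 + 1) % pat.length else 0)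
          = 1 / (c + 1) % pat.length := by
        cases c with
        | zero => simp
        | succ c =>
            have h1 : 1 % (c + 1 + 1) = 1 := Nat.mod_eq_of_lt (by omega)
            rw [if_neg (by omega), Nat.div_eq_of_lt (by omega), Nat.zero_mod]
      simp only [hblip]
      rw [innerA_eq pat (c + 1) elements 1 0, ih (c + 1) (by omega)]
      have hrange : elements.length - c = (elements.length - (c + 1)) + 1 := by omega
      rw [hrange, List.range'_succ, List.map_cons]
      congr 2
      rw [rowSum, zero_add]
      congr 1
      apply Finset.sum_congr rfl
      intro i _
      rw [show 1 + i = i + 1 from by omega]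

-- ===== VERDICT (by name: the statement is the Claim_ definition above) =====
theorem doAPhase_spec : Claim_equal_doAPhase := by
  intro elements mainPattern _hdom _hpre
  unfold Spec_doAPhase
  rw [doAPhase, outerA_eq elements mainPattern (elements.length - 0) 0 rfl, alt_eq]
  simp [List.range_eq_range']
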